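-- pv_equiv track=rewrite | github.com/KleberAraujoo/introduction_programming | IP_Questoes/python/Funções/q1.py | desempate
-- ===== SOURCE A (Python) =====
-- def desempate(cp_pokemon):
--     maior_cp = -1
--     pokemon_maior_cp = ""
--
--     for pokemon in cp_pokemon:
--         cp = pokemon[1]
--         nome_do_pokemon = pokemon[0]
--
--         if cp > maior_cp:
--             maior_cp = cp
--             pokemon_maior_cp = nome_do_pokemon
--         elif cp == maior_cp and len(nome_do_pokemon) > len(pokemon_maior_cp):
--             pokemon_maior_cp = nome_do_pokemon
--
--     return pokemon_maior_cp, maior_cp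
-- ===== SOURCE B (Python) =====
-- def desempate(cp_pokemon):
--     # Prepend the ("", -1) start value, sort descending by (cp, name length)
--     # (stable, so first-seen wins exact ties) and take the top element.
--     candidates = [("", -1)] + list(cp_pokemon)
--     best = sorted(candidates, key=lambda p: (p[1], len(p[0])), reverse=True)[0]
--     return (best[0], best[1])
-- ===== Notes on version B (the rewrite author's own statement) =====
-- stated objective: alternative
-- what changed: Replaces the manual best-so-far loop with a declarative sort: prepend the ("", -1) start value, stably sort descending by the composite key (cp, name length) and take the first element.
import Mathlib
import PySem

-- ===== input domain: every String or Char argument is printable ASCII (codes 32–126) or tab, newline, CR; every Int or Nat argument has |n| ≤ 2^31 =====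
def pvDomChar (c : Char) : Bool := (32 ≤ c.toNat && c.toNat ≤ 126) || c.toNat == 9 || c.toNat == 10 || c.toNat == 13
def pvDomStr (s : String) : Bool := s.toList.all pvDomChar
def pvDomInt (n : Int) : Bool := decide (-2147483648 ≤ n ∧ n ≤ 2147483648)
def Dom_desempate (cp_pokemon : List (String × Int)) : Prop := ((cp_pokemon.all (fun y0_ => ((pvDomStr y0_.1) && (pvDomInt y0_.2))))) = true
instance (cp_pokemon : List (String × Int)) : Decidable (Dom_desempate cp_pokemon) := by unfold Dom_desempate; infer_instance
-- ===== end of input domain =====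

-- B replaces A's manual best-so-far loop by a declarative sort: prepend the ("", -1) start
-- value, stably sort descending by the composite key (cp, name length) and take element 0
-- (objective: alternative; same results, no speed claim).


-- ===== PORT A =====
-- literal port: the loop keeps (maior_cp, pokemon_maior_cp) and returns them swapped
def desempate (cp_pokemon : List (String × Int)) : String × Int :=
  let st := cp_pokemon.foldl (fun (acc : Int × String) pokemon =>
      let cp := pokemon.2
      let nome_do_pokemon := pokemon.1
      if cp > acc.1 then (cp, nome_do_pokemon)
      else if cp = acc.1 ∧ PySem.Str.len nome_do_pokemon > PySem.Str.len acc.2 then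
        (acc.1, nome_do_pokemon)
      else acc) ((-1 : Int), "")
  (st.2, st.1)

-- ===== PORT B =====
def desempate_alt (cp_pokemon : List (String × Int)) : String × Int :=
  let candidates := [(("" : String), (-1 : Int))] ++ cp_pokemon
  -- candidates is nonempty, so Python's [0] always returns; pyGetD with a dummy default is exact here
  let best := PySem.List.pyGetD
    (PySem.List.sorted2 candidates (fun p => p.2) (fun p => PySem.Str.len p.1) true)
    0 ("", -1)
  (best.1, best.2)

-- ===== PRECONDITION & SPEC =====
def Spec_desempate (cp_pokemon : List (String × Int)) (out : String × Int) : Prop := out = desempate_alt cp_pokemon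
instance (cp_pokemon : List (String × Int)) (out : String × Int) : Decidable (Spec_desempate cp_pokemon out) := by unfold Spec_desempate; infer_instance

-- ===== CLAIM (what is proved, stated in full; the proofs are below) =====
def Claim_equal_desempate : Prop := ∀ (cp_pokemon : List (String × Int)), Dom_desempate cp_pokemon → Spec_desempate cp_pokemon (desempate cp_pokemon)

-- ===== LEMMAS AND PROOFS =====

-- the insertion predicate sorted2 uses with reverse=true on B's key pair
def pvBefore (x y : String × Int) : Bool :=
  decide (y.2 < x.2) || (!decide (x.2 < y.2) && decide (PySem.Str.len y.1 < PySem.Str.len x.1))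

-- "keep the better of best-so-far b and next p, first wins ties"
def pvPick (b p : String × Int) : String × Int := if pvBefore p b then p else b

lemma pv_insertBy_cons (x y : String × Int) (ys : List (String × Int)) :
    PySem.List.insertBy pvBefore x (y :: ys) =
      if pvBefore x y then x :: y :: ys else y :: PySem.List.insertBy pvBefore x ys := by
  simp [PySem.List.insertBy]

-- head of the insertion-sort fold = running first-max fold
lemma pv_head_foldl_ins (xs : List (String × Int)) : ∀ (y : String × Int) (ys : List (String × Int)),
    ((xs.foldl (fun acc x => PySem.List.insertBy pvBefore x acc) (y :: ys)).getD 0 ("", -1))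
      = xs.foldl pvPick y := by
  induction xs with
  | nil => intro y ys; rfl
  | cons x xs ih =>
    intro y ys
    rw [List.foldl_cons, pv_insertBy_cons, List.foldl_cons]
    by_cases h : pvBefore x y
    · rw [if_pos h, ih]
      congr 1
      simp [pvPick, h]
    · rw [if_neg h, ih]
      congr 1
      simp [pvPick, h]

-- A's loop body is pvPick with the state components swapped
lemma pv_foldl_swap (xs : List (String × Int)) : ∀ (c : Int) (n : String),
    xs.foldl (fun (acc : Int × String) pokemon =>
      let cp := pokemon.2
      let nome_do_pokemon := pokemon.1
      if cp > acc.1 then (cp, nome_do_pokemon)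
      else if cp = acc.1 ∧ PySem.Str.len nome_do_pokemon > PySem.Str.len acc.2 then
        (acc.1, nome_do_pokemon)
      else acc) (c, n)
    = ((xs.foldl pvPick (n, c)).2, (xs.foldl pvPick (n, c)).1) := by
  induction xs with
  | nil => intro c n; rfl
  | cons p xs ih =>
    intro c n
    simp only [List.foldl_cons]
    have hstep : (let cp := p.2
        let nome_do_pokemon := p.1
        if cp > c then (cp, nome_do_pokemon)
        else if cp = c ∧ PySem.Str.len nome_do_pokemon > PySem.Str.len n then
          (c, nome_do_pokemon)
        else (c, n))
        = ((pvPick (n, c) p).2, (pvPick (n, c) p).1) := by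
      simp only [pvPick, pvBefore, PySem.Str.len_eq, gt_iff_lt, Bool.or_eq_true,
        Bool.and_eq_true, Bool.not_eq_eq_eq_not, Bool.not_true, decide_eq_true_eq,
        decide_eq_false_iff_not]
      split_ifs with h1 h2 h3 h4 h5 <;> simp_all [Prod.ext_iff]; omega
    rw [hstep, ih]

theorem pv_main (cp_pokemon : List (String × Int)) :
    desempate cp_pokemon = desempate_alt cp_pokemon := by
  show ((cp_pokemon.foldl _ ((-1 : Int), "")).2, (cp_pokemon.foldl _ ((-1 : Int), "")).1) = _
  rw [pv_foldl_swap]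
  have hsorted : PySem.List.sorted2 ([(("" : String), (-1 : Int))] ++ cp_pokemon)
        (fun p => p.2) (fun p => PySem.Str.len p.1) true
      = cp_pokemon.foldl (fun acc x => PySem.List.insertBy pvBefore x acc)
          [(("" : String), (-1 : Int))] := rfl
  show _ = ((PySem.List.pyGetD (PySem.List.sorted2 _ _ _ true) 0 ("", -1)).1,
            (PySem.List.pyGetD (PySem.List.sorted2 _ _ _ true) 0 ("", -1)).2)
  rw [hsorted, PySem.List.pyGetD_zero, pv_head_foldl_ins]

-- ===== VERDICT (by name: the statement is the Claim_ definition above) =====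
theorem desempate_spec : Claim_equal_desempate := by
  intro xs _
  unfold Spec_desempate
  exact pv_main xs
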